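-- pv_equiv track=rewrite | github.com/Naufalspurnomo/keuangan | handlers/query_handler.py | _filter_rows_by_descriptors
-- ===== SOURCE A (Python) =====
-- def _normalize_text(text: str) -> str:
--     return " ".join((text or "").split()).casefold()
--
-- def _filter_rows_by_descriptors(rows: list, tokens: list) -> tuple:
--     """
--     Filter transaction rows by descriptor tokens found in keterangan/nama_projek.
--     Returns (filtered_rows, mode) where mode is 'strict', 'loose', or 'none'.
--
--     - strict: ALL tokens must match (AND logic)
--     - loose: ANY token matches (OR logic), used as fallback if strict yields 0
--     - none: no filtering applied
--     """
--     if not tokens or not rows: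
--         return rows, "none"
--
--     # Try strict first (all tokens must appear)
--     strict_rows = []
--     for row in rows:
--         haystack = _normalize_text(
--             f"{row.get('keterangan', '')} {row.get('nama_projek', '')}"
--         )
--         if all(token in haystack for token in tokens):
--             strict_rows.append(row)
--
--     if strict_rows:
--         return strict_rows, "strict"
--
--     # Fallback to loose (any token)
--     loose_rows = []
--     for row in rows:
--         haystack = _normalize_text(
--             f"{row.get('keterangan', '')} {row.get('nama_projek', '')}"
--         )
--         if any(token in haystack for token in tokens):
--             loose_rows.append(row)
--
--     if loose_rows:
--         return loose_rows, "loose"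
--
--     return rows, "none"
-- ===== SOURCE B (Python) =====
-- def _normalize_text(text: str) -> str:
--     return " ".join((text or "").split()).casefold()
--
-- def _filter_rows_by_descriptors(rows: list, tokens: list) -> tuple:
--     """Single pass: build strict and loose candidate lists simultaneously,
--     normalizing each row's haystack once."""
--     if not tokens or not rows:
--         return rows, "none"
--     strict_rows, loose_rows = [], []
--     for row in rows:
--         haystack = _normalize_text(
--             f"{row.get('keterangan', '')} {row.get('nama_projek', '')}"
--         )
--         hits = sum(1 for token in tokens if token in haystack)
--         if hits == len(tokens):
--             strict_rows.append(row)
--         if hits: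
--             loose_rows.append(row)
--     if strict_rows:
--         return strict_rows, "strict"
--     if loose_rows:
--         return loose_rows, "loose"
--     return rows, "none"
-- ===== Notes on version B (the rewrite author's own statement) =====
-- stated objective: faster
-- what changed: B makes a single pass over rows, normalizing each haystack once and counting token hits to build the strict and loose candidate lists simultaneously, instead of A's two sequential rescans that each re-normalize every row.
import Mathlib
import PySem

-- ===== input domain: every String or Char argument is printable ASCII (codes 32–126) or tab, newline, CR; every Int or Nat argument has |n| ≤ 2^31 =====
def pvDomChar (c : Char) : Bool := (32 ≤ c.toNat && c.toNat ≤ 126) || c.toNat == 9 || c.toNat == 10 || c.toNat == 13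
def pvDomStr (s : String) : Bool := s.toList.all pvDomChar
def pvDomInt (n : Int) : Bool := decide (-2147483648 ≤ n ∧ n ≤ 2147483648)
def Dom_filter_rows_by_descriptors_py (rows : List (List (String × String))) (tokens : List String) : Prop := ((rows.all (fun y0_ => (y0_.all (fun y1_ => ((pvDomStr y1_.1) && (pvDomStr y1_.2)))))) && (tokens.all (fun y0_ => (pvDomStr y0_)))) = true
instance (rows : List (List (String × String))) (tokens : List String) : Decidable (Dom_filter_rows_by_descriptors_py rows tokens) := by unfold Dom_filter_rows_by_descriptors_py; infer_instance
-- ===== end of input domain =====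

-- B merges A's two sequential scans into one pass over rows that normalizes each
-- haystack once and builds the strict and loose candidate lists simultaneously
-- (objective: faster by a constant factor; same return value).

-- ===== PORT A =====
-- _normalize_text(" ".join(text.split()).casefold()); casefold = lower exactly on the ASCII domain
def pvNormalize (text : List Char) : List Char :=
  PySem.Chars.lower (PySem.Chars.join [' '] (PySem.Chars.split₀ text))

-- haystack of one row: f"{row.get('keterangan','')} {row.get('nama_projek','')}" normalized
def pvHaystack (row : List (String × String)) : List Char :=
  pvNormalize (((PySem.Dict.mk row).getD "keterangan" "").toList ++ [' '] ++ ((PySem.Dict.mk row).getD "nama_projek" "").toList)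

def filter_rows_by_descriptors_py (rows : List (List (String × String))) (tokens : List String) : (List (List (String × String))) × String :=
  if tokens = [] ∨ rows = [] then (rows, "none")
  else
    let strict_rows := rows.foldl (fun acc row =>
      if tokens.all (fun token => PySem.Chars.isIn token.toList (pvHaystack row)) then acc ++ [row] else acc) []
    if strict_rows ≠ [] then (strict_rows, "strict")
    else
      let loose_rows := rows.foldl (fun acc row =>
        if tokens.any (fun token => PySem.Chars.isIn token.toList (pvHaystack row)) then acc ++ [row] else acc) []
      if loose_rows ≠ [] then (loose_rows, "loose")
      else (rows, "none")

-- ===== PORT B =====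
-- one pass: per row compute the haystack once, count token hits, extend both accumulators
def pvGoB (tokens : List String) : List (List (String × String)) → (List (List (String × String))) × (List (List (String × String)))
  | [] => ([], [])
  | row :: rest =>
    let haystack := pvHaystack row
    let hits := (tokens.filter (fun token => PySem.Chars.isIn token.toList haystack)).length
    let (s, l) := pvGoB tokens rest
    (if hits = tokens.length then row :: s else s, if hits ≠ 0 then row :: l else l)

def filter_rows_by_descriptors_py_alt (rows : List (List (String × String))) (tokens : List String) : (List (List (String × String))) × String :=
  if tokens = [] ∨ rows = [] then (rows, "none")
  else
    let (strict_rows, loose_rows) := pvGoB tokens rows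
    if strict_rows ≠ [] then (strict_rows, "strict")
    else if loose_rows ≠ [] then (loose_rows, "loose")
    else (rows, "none")

-- ===== PRECONDITION & SPEC =====
def Spec_filter_rows_by_descriptors_py (rows : List (List (String × String))) (tokens : List String) (out : (List (List (String × String))) × String) : Prop := out = filter_rows_by_descriptors_py_alt rows tokens
instance (rows : List (List (String × String))) (tokens : List String) (out : (List (List (String × String))) × String) : Decidable (Spec_filter_rows_by_descriptors_py rows tokens out) := by unfold Spec_filter_rows_by_descriptors_py; infer_instance

-- ===== CLAIM (what is proved, stated in full; the proofs are below) =====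
def Claim_equal_filter_rows_by_descriptors_py : Prop := ∀ (rows : List (List (String × String))) (tokens : List String), Dom_filter_rows_by_descriptors_py rows tokens → Spec_filter_rows_by_descriptors_py rows tokens (filter_rows_by_descriptors_py rows tokens)

-- ===== LEMMAS AND PROOFS =====

-- B's single pass computes exactly the two filters A computes in separate scans
theorem pvGoB_eq (tokens : List String) (rows : List (List (String × String))) :
    pvGoB tokens rows =
      (rows.filter (fun row => tokens.all (fun token => PySem.Chars.isIn token.toList (pvHaystack row))),
       rows.filter (fun row => tokens.any (fun token => PySem.Chars.isIn token.toList (pvHaystack row)))) := by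
  induction rows with
  | nil => rfl
  | cons row rest ih =>
    simp only [pvGoB, ih, List.filter_cons]
    have h1 : ((tokens.filter (fun token => PySem.Chars.isIn token.toList (pvHaystack row))).length = tokens.length)
        ↔ ((tokens.all (fun token => PySem.Chars.isIn token.toList (pvHaystack row))) = true) := by
      rw [List.length_filter_eq_length_iff, List.all_eq_true]
    have h2 : ((tokens.filter (fun token => PySem.Chars.isIn token.toList (pvHaystack row))).length ≠ 0)
        ↔ ((tokens.any (fun token => PySem.Chars.isIn token.toList (pvHaystack row))) = true) := by
      simp [Ne, List.length_eq_zero_iff, List.filter_eq_nil_iff, List.any_eq_true]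
    rw [if_congr h1 rfl rfl, if_congr h2 rfl rfl]

-- A's append-accumulator loop is a filter
theorem pvFoldl_filter (p : List (String × String) → Bool) (rows : List (List (String × String))) :
    rows.foldl (fun acc row => if p row then acc ++ [row] else acc) [] = rows.filter p := by
  simpa using PySem.List.foldl_append_if p id rows []

-- ===== VERDICT (by name: the statement is the Claim_ definition above) =====
theorem filter_rows_by_descriptors_py_spec : Claim_equal_filter_rows_by_descriptors_py := by
  intro rows tokens _
  unfold Spec_filter_rows_by_descriptors_py filter_rows_by_descriptors_py filter_rows_by_descriptors_py_alt
  by_cases h : tokens = [] ∨ rows = []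
  · simp [h]
  · simp only [h, if_false, pvGoB_eq, pvFoldl_filter]
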